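-- pv_equiv track=rewrite | github.com/hahyuning/Coding-test-study | problem_solving/2022/03/220312/220312_1.py | solution
-- ===== SOURCE A (Python) =====
-- def solution(n, edges):
--
--     def dfs(now, x):
--         cnt[now] = x
--
--         for nxt in graph[now]:
--             if cnt[nxt] == -1:
--                 dfs(nxt, x + 1)
--
--
--     ans = 0
--     graph = [[] for _ in range(n)]
--     for a, b in edges:
--         graph[a].append(b)
--         graph[b].append(a)
--
--     for i in range(n):
--         cnt = [-1] * n
--         dfs(i, 0)
--         ans += sum(cnt) - (n - 1)
--
--     return ans
-- ===== SOURCE B (Python) =====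
-- def solution(n, edges):
--     graph = [[] for _ in range(n)]
--     for a, b in edges:
--         graph[a].append(b)
--         graph[b].append(a)
--
--     total = 0
--     for i in range(len(graph)):
--         cnt = [-1] * n
--         stack = [(i, 0)]
--         while stack:
--             v, d = stack.pop()
--             if cnt[v] == -1:
--                 cnt[v] = d
--                 for u in reversed(graph[v]):
--                     if cnt[u] == -1:
--                         stack.append((u, d + 1))
--         total += sum(cnt)
--     return total - len(graph) * (n - 1)
-- ===== Notes on version B (the rewrite author's own statement) =====
-- stated objective: alternative
-- what changed: The per-source recursive DFS that mutates a shared cnt array is replaced by an iterative DFS over an explicit (node, depth) stack with the visited check at pop time, and the per-iteration '- (n - 1)' offset is hoisted out of the loop into a single closed-form subtraction at the end.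
import Mathlib
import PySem

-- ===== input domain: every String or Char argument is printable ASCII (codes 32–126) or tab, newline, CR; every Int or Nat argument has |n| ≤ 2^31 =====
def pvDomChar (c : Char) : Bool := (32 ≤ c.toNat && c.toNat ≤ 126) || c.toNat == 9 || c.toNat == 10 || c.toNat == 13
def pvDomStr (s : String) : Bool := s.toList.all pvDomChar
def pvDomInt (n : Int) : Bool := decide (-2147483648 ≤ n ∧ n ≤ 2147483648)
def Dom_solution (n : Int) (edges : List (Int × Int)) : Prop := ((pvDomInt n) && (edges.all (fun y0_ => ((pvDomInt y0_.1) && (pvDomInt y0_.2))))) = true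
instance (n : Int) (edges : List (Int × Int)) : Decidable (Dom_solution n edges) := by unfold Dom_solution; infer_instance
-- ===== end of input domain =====

-- B replaces A's recursive DFS by an explicit-stack iterative DFS (return value only; neither mutates its arguments).

-- ===== PORT A =====
-- shared Python-list primitive: graph[i].append(x) (negative i wraps, as in Python)
def pvAppendAt (g : List (List Int)) (i : Int) (x : Int) : List (List Int) :=
  match PySem.List.pyGet? g i with
  | some l => PySem.List.pySetD g i (l ++ [x])
  | none => g   -- Python raises IndexError here; excluded by Pre_solution

-- shared helper: the adjacency lists ('graph' in both Pythons, built by the same two appends per edge)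
def pvGraph (n : Int) (edges : List (Int × Int)) : List (List Int) :=
  edges.foldl (fun g p => pvAppendAt (pvAppendAt g p.1 p.2) p.2 p.1) (List.replicate n.toNat [])

-- A's recursive dfs(now, x) mutating cnt; fuel only makes the recursion total
-- (the entry call in `solution` supplies fuel n.toNat + 1 > number of -1 entries, which bounds the depth)
def pvDfs (g : List (List Int)) : Nat → Int → Int → List Int → List Int
  | 0, _, _, cnt => cnt
  | f + 1, now, x, cnt =>
    (PySem.List.pyGetD g now []).foldl
      (fun c nxt => if PySem.List.pyGet? c nxt = some (-1) then pvDfs g f nxt (x + 1) c else c)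
      (PySem.List.pySetD cnt now x)

def solution (n : Int) (edges : List (Int × Int)) : Int :=
  let graph := pvGraph n edges
  (PySem.List.pyRange 0 n 1).foldl
    (fun ans i =>
      ans + ((pvDfs graph (n.toNat + 1) i 0 (List.replicate n.toNat (-1))).sum - (n - 1)))
    0

-- ===== PORT B =====
-- number of -1 (unvisited) entries; termination measure of the stack loop
def pvMu (c : List Int) : Nat := c.count (-1)

theorem pvMu_pySetD_lt (xs : List Int) (i v : Int)
    (h : PySem.List.pyGet? xs i = some (-1)) (hv : v ≠ -1) :
    pvMu (PySem.List.pySetD xs i v) < pvMu xs := by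
  unfold PySem.List.pyGet? at h
  unfold PySem.List.pySetD PySem.List.pySet?
  cases hidx : PySem.List.pyIdx? xs.length i with
  | none => rw [hidx] at h; simp at h
  | some k =>
    rw [hidx] at h
    simp only [Option.bind_some] at h
    obtain ⟨hk, hck⟩ := List.getElem?_eq_some_iff.mp h
    have hmem : (-1 : Int) ∈ xs := hck ▸ List.getElem_mem hk
    have hpos : 0 < pvMu xs := List.count_pos_iff.mpr hmem
    simp only [Option.map_some, Option.getD_some]
    unfold pvMu at hpos ⊢
    rw [List.count_set hk]
    simp only [hck, beq_self_eq_true, if_true, beq_iff_eq, hv, if_false]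
    omega

-- B's while-stack loop.  The Lean list holds the stack TOP FIRST, so Python's
-- "append (u, d+1) for u in reversed(graph[v]) if cnt[u] == -1; pop from the end"
-- is exactly prepending graph[v], filtered, in original order.
-- The inner `if d = -1` branch is only a termination guard: `solution_alt` pushes
-- depths 0, d+1 ≥ 0 only, so it is never taken from the entry point.
def pvStack (g : List (List Int)) : List (Int × Int) → List Int → List Int
  | [], cnt => cnt
  | (v, d) :: rest, cnt =>
    if PySem.List.pyGet? cnt v = some (-1) then
      if d = -1 then cnt
      else
        pvStack g
          (((PySem.List.pyGetD g v []).filter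
              (fun u => PySem.List.pyGet? (PySem.List.pySetD cnt v d) u = some (-1))).map
            (fun u => (u, d + 1)) ++ rest)
          (PySem.List.pySetD cnt v d)
    else pvStack g rest cnt
  termination_by st cnt => (pvMu cnt, st.length)
  decreasing_by
  · exact Prod.Lex.left _ _ (pvMu_pySetD_lt _ _ _ (by assumption) (by assumption))
  · exact Prod.Lex.right _ (Nat.lt_succ_self _)

def solution_alt (n : Int) (edges : List (Int × Int)) : Int :=
  let graph := pvGraph n edges
  let total := (PySem.List.pyRange 0 n 1).foldl
    (fun total i => total + (pvStack graph [(i, 0)] (List.replicate n.toNat (-1))).sum) 0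
  total - (graph.length : Int) * (n - 1)

-- ===== PRECONDITION & SPEC =====
-- Pre_ excludes exactly the inputs on which Python A raises IndexError:
-- an edge endpoint outside [-n, n) (for n ≤ 0 the graph is empty, so any edge raises).
def Pre_solution (n : Int) (edges : List (Int × Int)) : Prop :=
  ∀ p ∈ edges, PySem.Raise.InRange n.toNat p.1 ∧ PySem.Raise.InRange n.toNat p.2
instance (n : Int) (edges : List (Int × Int)) : Decidable (Pre_solution n edges) := by
  unfold Pre_solution; infer_instance
def pvWitness_solution : Int × (List (Int × Int)) := (3, [(0, 1), (1, 2)])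

def Spec_solution (n : Int) (edges : List (Int × Int)) (out : Int) : Prop := out = solution_alt n edges
instance (n : Int) (edges : List (Int × Int)) (out : Int) : Decidable (Spec_solution n edges out) := by unfold Spec_solution; infer_instance

-- ===== CLAIM (what is proved, stated in full; the proofs are below) =====
def Claim_equal_solution : Prop := ∀ (n : Int) (edges : List (Int × Int)), Dom_solution n edges → Pre_solution n edges → Spec_solution n edges (solution n edges)


-- ===== LEMMAS AND PROOFS =====

-- ---- primitive lemmas about Python indexing (pyIdx?/pyGet?/pySetD) ----

theorem pvIdx_lt {n : Nat} {i : Int} {k : Nat}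
    (h : PySem.List.pyIdx? n i = some k) : k < n := by
  unfold PySem.List.pyIdx? at h
  split_ifs at h <;> simp_all <;> omega

theorem pvGet_spec {xs : List Int} {i w : Int}
    (h : PySem.List.pyGet? xs i = some w) :
    ∃ k : Nat, PySem.List.pyIdx? xs.length i = some k ∧ k < xs.length ∧ xs[k]? = some w := by
  unfold PySem.List.pyGet? at h
  cases hidx : PySem.List.pyIdx? xs.length i with
  | none => rw [hidx] at h; simp at h
  | some k =>
    rw [hidx] at h; simp at h
    exact ⟨k, rfl, pvIdx_lt hidx, h⟩

theorem pvSetD_eq (xs : List Int) (i v : Int) :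
    PySem.List.pySetD xs i v =
      (match PySem.List.pyIdx? xs.length i with
       | some k => xs.set k v
       | none => xs) := by
  unfold PySem.List.pySetD PySem.List.pySet?
  cases PySem.List.pyIdx? xs.length i <;> simp

theorem pvGet_none_iff (xs : List Int) (i : Int) :
    PySem.List.pyGet? xs i = none ↔ PySem.List.pyIdx? xs.length i = none := by
  unfold PySem.List.pyGet?
  cases hidx : PySem.List.pyIdx? xs.length i with
  | none => simp
  | some k => simp [List.getElem?_eq_getElem (pvIdx_lt hidx)]

theorem pvSetD_of_get_none {xs : List Int} {i : Int} (v : Int)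
    (h : PySem.List.pyGet? xs i = none) :
    PySem.List.pySetD xs i v = xs := by
  rw [pvSetD_eq, (pvGet_none_iff xs i).mp h]

theorem pvGet_pySetD_other {xs : List Int} {i j w : Int} (v : Int)
    (hi : PySem.List.pyGet? xs i = some (-1))
    (hj : PySem.List.pyGet? xs j = some w) (hw : w ≠ -1) :
    PySem.List.pyGet? (PySem.List.pySetD xs i v) j = some w := by
  obtain ⟨ki, hidxi, hki, hgi⟩ := pvGet_spec hi
  obtain ⟨kj, hidxj, hkj, hgj⟩ := pvGet_spec hj
  have hne : ki ≠ kj := by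
    intro he; rw [he, hgj] at hgi
    exact hw (Option.some.inj hgi)
  rw [pvSetD_eq, hidxi]
  unfold PySem.List.pyGet?
  rw [List.length_set, hidxj]
  simp only [Option.bind_some]
  rw [List.getElem?_set_ne hne]
  exact hgj

theorem pvGet_none_of_length_eq {xs ys : List Int} {j : Int}
    (hlen : ys.length = xs.length) (h : PySem.List.pyGet? xs j = none) :
    PySem.List.pyGet? ys j = none := by
  rw [pvGet_none_iff] at h ⊢
  rw [hlen]; exact h

-- ---- lemmas about A's recursive dfs ----

theorem pvDfs_length (g : List (List Int)) :
    ∀ (f : Nat) (now x : Int) (cs : List Int), (pvDfs g f now x cs).length = cs.length := by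
  intro f
  induction f with
  | zero => intro now x cs; rfl
  | succ f ih =>
    intro now x cs
    have aux : ∀ (L : List Int) (cs' : List Int),
        (L.foldl (fun c nxt => if PySem.List.pyGet? c nxt = some (-1) then pvDfs g f nxt (x + 1) c else c) cs').length = cs'.length := by
      intro L
      induction L with
      | nil => intro cs'; rfl
      | cons u L' ihL =>
        intro cs'
        simp only [List.foldl_cons]
        rw [ihL]
        split
        · rw [ih]
        · rfl
    simp only [pvDfs]
    rw [aux, PySem.List.length_pySetD]

theorem pvDfs_preserve (g : List (List Int)) :
    ∀ (f : Nat) (now x j w : Int) (cs : List Int), 0 ≤ x →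
      (PySem.List.pyGet? cs now = none ∨ PySem.List.pyGet? cs now = some (-1)) →
      PySem.List.pyGet? cs j = some w → w ≠ -1 →
      PySem.List.pyGet? (pvDfs g f now x cs) j = some w := by
  intro f
  induction f with
  | zero => intro now x j w cs _ _ hj _; exact hj
  | succ f ih =>
    intro now x j w cs hx hnow hj hw
    have hset : PySem.List.pyGet? (PySem.List.pySetD cs now x) j = some w := by
      rcases hnow with hnone | hneg
      · rw [pvSetD_of_get_none x hnone]; exact hj
      · exact pvGet_pySetD_other x hneg hj hw
    have aux : ∀ (L : List Int) (cs' : List Int),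
        PySem.List.pyGet? cs' j = some w →
        PySem.List.pyGet?
          (L.foldl (fun c nxt => if PySem.List.pyGet? c nxt = some (-1) then pvDfs g f nxt (x + 1) c else c) cs') j = some w := by
      intro L
      induction L with
      | nil => intro cs' h; exact h
      | cons u L' ihL =>
        intro cs' h
        simp only [List.foldl_cons]
        by_cases hu : PySem.List.pyGet? cs' u = some (-1)
        · rw [if_pos hu]
          exact ihL _ (ih u (x + 1) j w cs' (by omega) (Or.inr hu) h hw)
        · rw [if_neg hu]
          exact ihL _ h
    simp only [pvDfs]
    exact aux _ _ hset

theorem pvDfs_mu_le (g : List (List Int)) :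
    ∀ (f : Nat) (now x : Int) (cs : List Int), 0 ≤ x →
      (PySem.List.pyGet? cs now = none ∨ PySem.List.pyGet? cs now = some (-1)) →
      pvMu (pvDfs g f now x cs) ≤ pvMu cs := by
  intro f
  induction f with
  | zero => intro now x cs _ _; exact le_refl _
  | succ f ih =>
    intro now x cs hx hnow
    have hset : pvMu (PySem.List.pySetD cs now x) ≤ pvMu cs := by
      rcases hnow with hnone | hneg
      · rw [pvSetD_of_get_none x hnone]
      · exact le_of_lt (pvMu_pySetD_lt cs now x hneg (by omega))
    have aux : ∀ (L : List Int) (cs' : List Int),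
        pvMu (L.foldl (fun c nxt => if PySem.List.pyGet? c nxt = some (-1) then pvDfs g f nxt (x + 1) c else c) cs') ≤ pvMu cs' := by
      intro L
      induction L with
      | nil => intro cs'; exact le_refl _
      | cons u L' ihL =>
        intro cs'
        simp only [List.foldl_cons]
        by_cases hu : PySem.List.pyGet? cs' u = some (-1)
        · rw [if_pos hu]
          exact le_trans (ihL _) (ih u (x + 1) cs' (by omega) (Or.inr hu))
        · rw [if_neg hu]
          exact ihL _
    simp only [pvDfs]
    exact le_trans (aux _ _) hset

-- fuel irrelevance: any fuel strictly above the number of unvisited entries gives the same result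
theorem pvDfs_fuel (g : List (List Int)) :
    ∀ (k : Nat) (cs : List Int) (v d : Int) (a b : Nat),
      PySem.List.pyGet? cs v = some (-1) → 0 ≤ d → pvMu cs ≤ k + 1 → k < a → k < b →
      pvDfs g a v d cs = pvDfs g b v d cs := by
  intro k
  induction k using Nat.strong_induction_on with
  | _ k IH =>
    intro cs v d a b hv hd hmu ha hb
    obtain ⟨a', rfl⟩ : ∃ a', a = a' + 1 := ⟨a - 1, by omega⟩
    obtain ⟨b', rfl⟩ : ∃ b', b = b' + 1 := ⟨b - 1, by omega⟩
    have hmu' : pvMu (PySem.List.pySetD cs v d) ≤ k := by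
      have := pvMu_pySetD_lt cs v d hv (by omega)
      omega
    have aux : ∀ (L : List Int) (cs₀ : List Int), pvMu cs₀ ≤ k →
        L.foldl (fun c nxt => if PySem.List.pyGet? c nxt = some (-1) then pvDfs g a' nxt (d + 1) c else c) cs₀ =
        L.foldl (fun c nxt => if PySem.List.pyGet? c nxt = some (-1) then pvDfs g b' nxt (d + 1) c else c) cs₀ := by
      intro L
      induction L with
      | nil => intro cs₀ _; rfl
      | cons u L' ihL =>
        intro cs₀ h0
        simp only [List.foldl_cons]
        by_cases hu : PySem.List.pyGet? cs₀ u = some (-1)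
        · have hpos : 1 ≤ pvMu cs₀ :=
            List.count_pos_iff.mpr (PySem.List.mem_of_pyGet?_eq_some cs₀ hu)
          have heq : pvDfs g a' u (d + 1) cs₀ = pvDfs g b' u (d + 1) cs₀ :=
            IH (k - 1) (by omega) cs₀ u (d + 1) a' b' hu (by omega) (by omega) (by omega) (by omega)
          rw [if_pos hu, if_pos hu, heq]
          exact ihL _ (le_trans (pvDfs_mu_le g b' u (d + 1) cs₀ (by omega) (Or.inr hu)) h0)
        · rw [if_neg hu, if_neg hu]
          exact ihL _ h0
    simp only [pvDfs]
    exact aux _ _ hmu'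

-- ---- the bridge: B's explicit stack loop computes iterated canonical dfs calls ----

theorem pvStack_eq (g : List (List Int)) :
    ∀ (k : Nat) (st : List (Int × Int)) (cs : List Int),
      pvMu cs ≤ k → (∀ p ∈ st, 0 ≤ p.2) →
      pvStack g st cs =
        st.foldl (fun c p => if PySem.List.pyGet? c p.1 = some (-1) then pvDfs g (pvMu c + 1) p.1 p.2 c else c) cs := by
  intro k
  induction k using Nat.strong_induction_on with
  | _ k IH =>
    intro st
    induction st with
    | nil => intro cs _ _; simp [pvStack]
    | cons p rest ihst =>
      obtain ⟨v, d⟩ := p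
      intro cs hk hpos
      have hd0 : 0 ≤ d := hpos (v, d) (List.mem_cons_self)
      simp only [List.foldl_cons]
      by_cases hv : PySem.List.pyGet? cs v = some (-1)
      · have hdne : ¬(d = -1) := by omega
        rw [pvStack, if_pos hv, if_neg hdne]
        have hlt : pvMu (PySem.List.pySetD cs v d) < pvMu cs :=
          pvMu_pySetD_lt cs v d hv (by omega)
        have hk1 : 1 ≤ pvMu cs :=
          List.count_pos_iff.mpr (PySem.List.mem_of_pyGet?_eq_some cs hv)
        -- outer IH at k - 1 on the pushed stack
        rw [IH (k - 1) (by omega) _ _ (by omega)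
              (by
                intro q hq
                rcases List.mem_append.mp hq with hq1 | hq2
                · obtain ⟨u, _, rfl⟩ := List.mem_map.mp hq1
                  simp; omega
                · exact hpos q (List.mem_cons_of_mem _ hq2))]
        rw [List.foldl_append, if_pos hv]
        congr 1
        -- remaining: the pushed, filtered segment folds to one canonical dfs call
        show _ = pvDfs g (pvMu cs + 1) v d cs
        conv_rhs => rw [pvDfs]
        have aux2 : ∀ (L₀ : List Int) (c₀ : List Int),
            pvMu c₀ ≤ pvMu (PySem.List.pySetD cs v d) →
            (∀ (u w : Int), PySem.List.pyGet? (PySem.List.pySetD cs v d) u = some w → w ≠ -1 →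
              PySem.List.pyGet? c₀ u = some w) →
            c₀.length = (PySem.List.pySetD cs v d).length →
            ((L₀.filter (fun u => PySem.List.pyGet? (PySem.List.pySetD cs v d) u = some (-1))).map
                (fun u => (u, d + 1))).foldl
              (fun c p => if PySem.List.pyGet? c p.1 = some (-1) then pvDfs g (pvMu c + 1) p.1 p.2 c else c) c₀ =
            L₀.foldl (fun c nxt => if PySem.List.pyGet? c nxt = some (-1) then pvDfs g (pvMu cs) nxt (d + 1) c else c) c₀ := by
          intro L₀
          induction L₀ with
          | nil => intro c₀ _ _ _; rfl
          | cons u L' ihL =>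
            intro c₀ hμ0 hinv hlen
            by_cases hpu : PySem.List.pyGet? (PySem.List.pySetD cs v d) u = some (-1)
            · rw [List.filter_cons_of_pos (by simpa using hpu)]
              simp only [List.map_cons, List.foldl_cons]
              by_cases hcu : PySem.List.pyGet? c₀ u = some (-1)
              · have hpos0 : 1 ≤ pvMu c₀ :=
                  List.count_pos_iff.mpr (PySem.List.mem_of_pyGet?_eq_some c₀ hcu)
                have heq : pvDfs g (pvMu c₀ + 1) u (d + 1) c₀ = pvDfs g (pvMu cs) u (d + 1) c₀ :=
                  pvDfs_fuel g (pvMu c₀ - 1) c₀ u (d + 1) _ _ hcu (by omega) (by omega) (by omega) (by omega)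
                rw [if_pos hcu, if_pos hcu, heq]
                exact ihL _
                  (le_trans (pvDfs_mu_le g (pvMu cs) u (d + 1) c₀ (by omega) (Or.inr hcu)) hμ0)
                  (fun u' w h1 h2 =>
                    pvDfs_preserve g (pvMu cs) u (d + 1) u' w c₀ (by omega) (Or.inr hcu) (hinv u' w h1 h2) h2)
                  (by rw [pvDfs_length]; exact hlen)
              · rw [if_neg hcu, if_neg hcu]
                exact ihL _ hμ0 hinv hlen
            · rw [List.filter_cons_of_neg (by simpa using hpu)]
              have hcu : ¬ PySem.List.pyGet? c₀ u = some (-1) := by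
                cases hx : PySem.List.pyGet? (PySem.List.pySetD cs v d) u with
                | none =>
                  rw [pvGet_none_of_length_eq hlen hx]
                  simp
                | some w =>
                  have hw : w ≠ -1 := by intro h; rw [h] at hx; exact hpu hx
                  rw [hinv u w hx hw]
                  simp [hw]
              simp only [List.foldl_cons]
              rw [if_neg hcu]
              exact ihL _ hμ0 hinv hlen
        exact aux2 _ _ (le_refl _) (fun _ _ h _ => h) rfl
      · rw [pvStack, if_neg hv, if_neg hv]
        exact ihst cs hk (fun q hq => hpos q (List.mem_cons_of_mem _ hq))

-- ---- assembly helpers ----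

theorem pvGraph_length (n : Int) (edges : List (Int × Int)) :
    (pvGraph n edges).length = n.toNat := by
  unfold pvGraph
  have aux : ∀ (es : List (Int × Int)) (g₀ : List (List Int)),
      (es.foldl (fun g p => pvAppendAt (pvAppendAt g p.1 p.2) p.2 p.1) g₀).length = g₀.length := by
    intro es
    induction es with
    | nil => intro g₀; rfl
    | cons e es' ihe =>
      intro g₀
      simp only [List.foldl_cons]
      rw [ihe]
      have hlen : ∀ (g₁ : List (List Int)) (i x : Int), (pvAppendAt g₁ i x).length = g₁.length := by
        intro g₁ i x
        unfold pvAppendAt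
        cases PySem.List.pyGet? g₁ i with
        | none => rfl
        | some l => exact PySem.List.length_pySetD g₁ i (l ++ [x])
      rw [hlen, hlen]
  rw [aux, List.length_replicate]

theorem pv_sum_map_sub (l : List Int) (f : Int → Int) (c : Int) :
    (l.map (fun i => f i - c)).sum = (l.map f).sum - (l.length : Int) * c := by
  induction l with
  | nil => simp
  | cons u l' ih =>
    simp only [List.map_cons, List.sum_cons, List.length_cons, ih]
    push_cast
    ring

-- ===== VERDICT (by name: the statement is the Claim_ definition above) =====
theorem pvMu_replicate (m : Nat) : pvMu (List.replicate m (-1)) = m := by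
  unfold pvMu
  simp

theorem pvStack_single (g : List (List Int)) (n i : Int)
    (h0 : 0 ≤ i) (hn : i < n) :
    pvStack g [(i, 0)] (List.replicate n.toNat (-1)) =
      pvDfs g (n.toNat + 1) i 0 (List.replicate n.toNat (-1)) := by
  have hlook : PySem.List.pyGet? (List.replicate n.toNat (-1 : Int)) i = some (-1) := by
    rw [PySem.List.pyGet?_of_nonneg _ h0]
    rw [List.getElem?_replicate]
    have : i.toNat < n.toNat := by omega
    simp [this]
  rw [pvStack_eq g (pvMu (List.replicate n.toNat (-1))) [(i, 0)] _ (le_refl _)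
        (by intro p hp; simp at hp; simp [hp])]
  simp only [List.foldl_cons, List.foldl_nil]
  rw [if_pos hlook, pvMu_replicate]

theorem solution_spec : Claim_equal_solution := by
  unfold Claim_equal_solution
  intro n edges _ _
  unfold Spec_solution solution solution_alt
  simp only []
  rw [PySem.List.foldl_add, PySem.List.foldl_add, pv_sum_map_sub]
  have hmap : (PySem.List.pyRange 0 n 1).map
        (fun i => (pvStack (pvGraph n edges) [(i, 0)] (List.replicate n.toNat (-1))).sum) =
      (PySem.List.pyRange 0 n 1).map
        (fun i => (pvDfs (pvGraph n edges) (n.toNat + 1) i 0 (List.replicate n.toNat (-1))).sum) := by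
    apply List.map_congr_left
    intro i hi
    obtain ⟨h0, hn⟩ := PySem.List.mem_pyRange_one.mp hi
    rw [pvStack_single _ _ _ h0 hn]
  have hlen : ((PySem.List.pyRange 0 n 1).length : Int) = ((pvGraph n edges).length : Int) := by
    rw [PySem.List.length_pyRange_one, pvGraph_length]
    simp
  rw [hmap, hlen]
  ring
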